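-- pv_equiv track=rewrite | github.com/dybala-21/rune | rune/agent/advisor/normalizer.py | strip_system_echo
-- ===== SOURCE A (Python) =====
-- _SYSTEM_ECHO_PREFIXES = (
--     "You are an ADVISOR",
--     "You are the advisor",
--     "System:",
-- )
--
-- def strip_system_echo(text: str) -> str:
--     """Drop leading lines that echo the system prompt (common with small
--     local models that have weak instruction following)."""
--     lines = text.splitlines()
--     kept: list[str] = []
--     skipping = True
--     for line in lines:
--         stripped = line.strip()
--         if skipping and any(stripped.startswith(p) for p in _SYSTEM_ECHO_PREFIXES):
--             continue
--         if stripped: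
--             skipping = False
--         kept.append(line)
--     return "\n".join(kept)
-- ===== SOURCE B (Python) =====
-- _SYSTEM_ECHO_PREFIXES = (
--     "You are an ADVISOR",
--     "You are the advisor",
--     "System:",
-- )
--
-- def _boundary(lines):
--     """Index of the first line whose stripped form is non-empty and is not a
--     system-prompt echo; len(lines) if there is none."""
--     for i, line in enumerate(lines):
--         s = line.strip()
--         if s and not any(s.startswith(p) for p in _SYSTEM_ECHO_PREFIXES):
--             return i
--     return len(lines)
--
-- def strip_system_echo(text: str) -> str:
--     """Drop leading lines that echo the system prompt (common with small
--     local models that have weak instruction following)."""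
--     lines = text.splitlines()
--     c = _boundary(lines)
--     blanks = [l for l in lines[:c] if not l.strip()]
--     return "\n".join(blanks + lines[c:])
-- ===== Notes on version B (the rewrite author's own statement) =====
-- stated objective: alternative
-- what changed: Replaces the stateful skipping-flag loop by a boundary search (index of the first real content line) followed by slice surgery: keep only the blank lines before the boundary and everything after it verbatim.
import Mathlib
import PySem

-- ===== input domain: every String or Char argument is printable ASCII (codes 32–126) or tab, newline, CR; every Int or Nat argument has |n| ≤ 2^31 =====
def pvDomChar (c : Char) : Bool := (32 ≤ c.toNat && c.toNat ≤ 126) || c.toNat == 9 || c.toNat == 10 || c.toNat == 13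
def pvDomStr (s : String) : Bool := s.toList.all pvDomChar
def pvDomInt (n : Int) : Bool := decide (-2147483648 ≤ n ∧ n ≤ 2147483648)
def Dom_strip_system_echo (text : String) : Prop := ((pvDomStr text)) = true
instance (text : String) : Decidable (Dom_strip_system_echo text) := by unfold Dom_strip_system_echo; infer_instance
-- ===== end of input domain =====

-- B replaces A's stateful skipping-flag loop by a boundary search plus slice surgery (objective: alternative, same cost).

-- ===== PORT A =====
-- shared module constant: does a stripped line start with one of _SYSTEM_ECHO_PREFIXES?
def sseEcho (s : String) : Bool :=
  PySem.Str.startswith s "You are an ADVISOR" ||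
  PySem.Str.startswith s "You are the advisor" ||
  PySem.Str.startswith s "System:"

-- A's for-loop: state = (kept reversed-free accumulator, skipping flag)
def sseLoopA : List String → List String → Bool → List String
  | [], kept, _ => kept
  | line :: rest, kept, skipping =>
    let stripped := PySem.Str.strip line
    if skipping && sseEcho stripped then
      sseLoopA rest kept skipping
    else
      sseLoopA rest (kept ++ [line]) (if stripped == "" then skipping else false)

def strip_system_echo (text : String) : String :=
  PySem.Str.join "\n" (sseLoopA (PySem.Str.splitlines text) [] true)

-- ===== PORT B =====
-- Source B's _boundary: index of first line with non-empty stripped form that is not an echo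
def sseBoundary : List String → Nat
  | [] => 0
  | line :: rest =>
    let s := PySem.Str.strip line
    if (s != "") && !sseEcho s then 0 else 1 + sseBoundary rest

def strip_system_echo_alt (text : String) : String :=
  let lines := PySem.Str.splitlines text
  let c := sseBoundary lines
  let blanks := (lines.take c).filter (fun l => PySem.Str.strip l == "")
  PySem.Str.join "\n" (blanks ++ lines.drop c)

-- ===== PRECONDITION & SPEC =====
def Spec_strip_system_echo (text : String) (out : String) : Prop := out = strip_system_echo_alt text
instance (text : String) (out : String) : Decidable (Spec_strip_system_echo text out) := by unfold Spec_strip_system_echo; infer_instance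

-- ===== CLAIM (what is proved, stated in full; the proofs are below) =====
def Claim_equal_strip_system_echo : Prop := ∀ (text : String), Dom_strip_system_echo text → Spec_strip_system_echo text (strip_system_echo text)

-- ===== LEMMAS AND PROOFS =====

theorem sseEcho_empty : sseEcho "" = false := by decide

-- once skipping is False, A's loop just appends the remaining lines
theorem sseLoopA_false (lines kept : List String) :
    sseLoopA lines kept false = kept ++ lines := by
  induction lines generalizing kept with
  | nil => simp [sseLoopA]
  | cons line rest ih =>
    simp only [sseLoopA, Bool.false_and, if_neg (by simp : ¬ (false = true)), ite_self]
    rw [ih]; simp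

-- with skipping = True, A's loop computes B's boundary/slice decomposition
theorem sseLoopA_true (lines kept : List String) :
    sseLoopA lines kept true =
      kept ++ ((lines.take (sseBoundary lines)).filter (fun l => PySem.Str.strip l == "")
               ++ lines.drop (sseBoundary lines)) := by
  induction lines generalizing kept with
  | nil => simp [sseLoopA, sseBoundary]
  | cons line rest ih =>
    simp only [sseLoopA, sseBoundary]
    by_cases he : sseEcho (PySem.Str.strip line) = true
    · have hne : (PySem.Str.strip line == "") = false := by
        cases h : (PySem.Str.strip line == "") with
        | false => rfl
        | true => exact absurd he (by simp [eq_of_beq h, sseEcho_empty])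
      rw [if_pos (by simp [he]), if_neg (by simp [bne, he]), ih]
      simp [Nat.add_comm 1, hne]
    · have he' : sseEcho (PySem.Str.strip line) = false := by
        cases h : sseEcho (PySem.Str.strip line) <;> simp_all
      rw [if_neg (by simp [he'])]
      by_cases hb : (PySem.Str.strip line == "") = true
      · rw [if_pos hb, if_neg (by simp [bne, hb]), ih]
        simp [Nat.add_comm 1, hb]
      · have hb' : (PySem.Str.strip line == "") = false := by
          cases h : (PySem.Str.strip line == "") <;> simp_all
        rw [if_neg (by simp [hb']), if_pos (by simp [bne, hb', he']), sseLoopA_false]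
        simp

-- ===== VERDICT (by name: the statement is the Claim_ definition above) =====
theorem strip_system_echo_spec : Claim_equal_strip_system_echo := by
  intro text _
  unfold Spec_strip_system_echo strip_system_echo strip_system_echo_alt
  rw [sseLoopA_true]
  simp
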